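-- pv_equiv track=rewrite | github.com/TheTomcat/AdventOfCode | 2020/6/problem6.py | consolidate_questions
-- ===== SOURCE A (Python) =====
-- def consolidate_questions(list_of_strs):
--     consol = {i:True for i in 'qwertyuiopasdfghjklzxcvbnm'}
--     for response in list_of_strs:
--         responses = list(response)
--         for answer in 'qwertyuiopasdfghjklzxcvbnm':
--             if answer not in responses:
--                 consol[answer]=False
--     return consol
-- ===== SOURCE B (Python) =====
-- def consolidate_questions(list_of_strs):
--     # Counting algorithm: tally, for each character, the number of responses
--     # that contain it; a letter is common iff its tally equals the number of
--     # responses (vacuously all 26 for an empty list).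
--     n = len(list_of_strs)
--     counts = {}
--     for response in list_of_strs:
--         for ch in set(response):
--             counts[ch] = counts.get(ch, 0) + 1
--     return {c: counts.get(c, 0) == n for c in 'qwertyuiopasdfghjklzxcvbnm'}
-- ===== Notes on version B (the rewrite author's own statement) =====
-- stated objective: faster
-- what changed: Replaces A's per-response boolean-flag updates (scanning all 26 letters against each response with list membership) by a counting algorithm: one pass tallies how many responses contain each character (deduplicated per response), and a letter is common iff its tally equals len(list_of_strs); this drops the 26 list-membership scans per response.
import Mathlib
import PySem

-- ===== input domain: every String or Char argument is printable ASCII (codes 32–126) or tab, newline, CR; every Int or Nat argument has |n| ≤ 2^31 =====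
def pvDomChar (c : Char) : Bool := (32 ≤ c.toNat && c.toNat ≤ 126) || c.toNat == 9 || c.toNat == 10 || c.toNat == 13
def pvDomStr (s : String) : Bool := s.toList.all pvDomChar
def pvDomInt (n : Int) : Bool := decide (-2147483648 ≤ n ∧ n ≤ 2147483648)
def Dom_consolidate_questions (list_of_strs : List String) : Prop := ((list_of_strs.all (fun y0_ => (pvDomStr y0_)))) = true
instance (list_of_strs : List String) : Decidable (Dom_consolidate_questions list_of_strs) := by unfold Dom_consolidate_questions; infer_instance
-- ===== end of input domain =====

-- B replaces A's per-response boolean-flag updates by a counting algorithm: tally how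
-- many responses contain each character, then compare each tally with the number of
-- responses (objective: alternative). A is total; no Pre_ needed.

-- the alphabet string iterated over in both Pythons, as chars
def pvAlpha : List Char := "qwertyuiopasdfghjklzxcvbnm".toList

-- iterating a Python string yields length-1 strings (the dict keys)
def pvKey (c : Char) : String := String.ofList [c]

-- ===== PORT A =====
-- A: build consol = {letter: True}, then for each response set consol[letter] = False
-- for every letter not in list(response); return the dict (its items list).
def consolidate_questions (list_of_strs : List String) : List (String × Bool) :=
  let consol : PySem.Dict String Bool :=
    pvAlpha.foldl (fun d i => d.insert (pvKey i) true) PySem.Dict.empty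
  let consol :=
    list_of_strs.foldl
      (fun d response =>
        let responses := response.toList
        pvAlpha.foldl
          (fun d answer =>
            if responses.contains answer then d else d.insert (pvKey answer) false)
          d)
      consol
  consol.items

-- ===== PORT B =====
-- B: n = len(list); counts[ch] tallies, over one pass, the number of responses whose
-- set of characters contains ch; return {c: counts.get(c, 0) == n for c in alphabet}.
def consolidate_questions_alt (list_of_strs : List String) : List (String × Bool) :=
  let n : Int := list_of_strs.length
  let counts : PySem.Dict Char Int :=
    list_of_strs.foldl
      (fun counts response =>
        (PySem.Set.ofList response.toList).foldl
          (fun counts ch => counts.insert ch (counts.getD ch 0 + 1))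
          counts)
      PySem.Dict.empty
  pvAlpha.map (fun c => (pvKey c, counts.getD c 0 == n))

-- ===== PRECONDITION & SPEC =====
def Spec_consolidate_questions (list_of_strs : List String) (out : List (String × Bool)) : Prop := out = consolidate_questions_alt list_of_strs
instance (list_of_strs : List String) (out : List (String × Bool)) : Decidable (Spec_consolidate_questions list_of_strs out) := by unfold Spec_consolidate_questions; infer_instance

-- ===== CLAIM (what is proved, stated in full; the proofs are below) =====
def Claim_equal_consolidate_questions : Prop := ∀ (list_of_strs : List String), Dom_consolidate_questions list_of_strs → Spec_consolidate_questions list_of_strs (consolidate_questions list_of_strs)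

-- ===== LEMMAS AND PROOFS =====

theorem pvKey_inj {a c : Char} (h : pvKey a = pvKey c) : a = c := by
  simpa [pvKey] using congrArg String.toList h

-- getD through A's initial {letter: True} loop
theorem getD_init (q : List Char) (d : PySem.Dict String Bool) (a : Char) :
    (q.foldl (fun d i => d.insert (pvKey i) true) d).getD (pvKey a) false =
      (if a ∈ q then true else d.getD (pvKey a) false) := by
  induction q generalizing d with
  | nil => simp
  | cons c q ih =>
    simp only [List.foldl_cons, ih, List.mem_cons]
    by_cases hac : a = c
    · subst hac
      by_cases haq : a ∈ q <;> simp [haq, PySem.Dict.getD_insert_self]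
    · have hne : pvKey a ≠ pvKey c := fun h => hac (pvKey_inj h)
      by_cases haq : a ∈ q <;>
        simp [haq, hac, PySem.Dict.getD_insert_of_ne _ _ _ hne]

-- getD through one response's inner 26-letter loop of A
theorem getD_inner (r : List Char) (q : List Char) (d : PySem.Dict String Bool) (a : Char) :
    (q.foldl (fun d answer => if r.contains answer then d else d.insert (pvKey answer) false) d).getD (pvKey a) false =
      (d.getD (pvKey a) false && (!decide (a ∈ q) || r.contains a)) := by
  induction q generalizing d with
  | nil => simp
  | cons c q ih =>
    simp only [List.foldl_cons, ih, List.mem_cons]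
    by_cases hac : a = c
    · subst hac
      by_cases hr : a ∈ r
      · simp [hr]
      · simp [hr, PySem.Dict.getD_insert_self]
    · have hne : pvKey a ≠ pvKey c := fun h => hac (pvKey_inj h)
      by_cases hr : c ∈ r
      · simp [hr, hac]
      · simp [hr, hac, PySem.Dict.getD_insert_of_ne _ _ _ hne]

-- getD through A's outer loop over the responses
theorem getD_outer (l : List String) (d : PySem.Dict String Bool) (a : Char) :
    (l.foldl
        (fun d response =>
          pvAlpha.foldl
            (fun d answer => if response.toList.contains answer then d else d.insert (pvKey answer) false) d)
        d).getD (pvKey a) false =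
      (d.getD (pvKey a) false &&
        l.all (fun response => !decide (a ∈ pvAlpha) || response.toList.contains a)) := by
  induction l generalizing d with
  | nil => simp
  | cons r l ih =>
    simp only [List.foldl_cons, ih, getD_inner, List.all_cons, Bool.and_assoc]

-- the keys of A's dict stay exactly the alphabet keys through one inner loop
theorem keys_inner (r : List Char) (q : List Char) (d : PySem.Dict String Bool)
    (h : ∀ c ∈ q, d.contains (pvKey c) = true) :
    (q.foldl (fun d answer => if r.contains answer then d else d.insert (pvKey answer) false) d).keys = d.keys := by
  induction q generalizing d with
  | nil => simp
  | cons c q ih =>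
    simp only [List.foldl_cons]
    by_cases hr : r.contains c
    · rw [if_pos hr]
      exact ih d (fun c hc => h c (List.mem_cons_of_mem _ hc))
    · rw [if_neg (by simp_all)]
      rw [ih _ (fun c' hc' => by
        rw [PySem.Dict.contains_insert]
        simp [h c' (List.mem_cons_of_mem _ hc')])]
      exact PySem.Dict.keys_insert_of_contains _ _ (h c (List.mem_cons_self))

theorem keys_init :
    (pvAlpha.foldl (fun d i => d.insert (pvKey i) true) PySem.Dict.empty).keys = pvAlpha.map pvKey := by
  decide

theorem keys_outer (l : List String) (d : PySem.Dict String Bool)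
    (h : d.keys = pvAlpha.map pvKey) :
    (l.foldl
        (fun d response =>
          pvAlpha.foldl
            (fun d answer => if response.toList.contains answer then d else d.insert (pvKey answer) false) d)
        d).keys = pvAlpha.map pvKey := by
  induction l generalizing d with
  | nil => simpa using h
  | cons r l ih =>
    simp only [List.foldl_cons]
    refine ih _ ?_
    rw [keys_inner _ _ _ (fun c hc => ?_), h]
    rw [PySem.Dict.contains_iff_mem_keys, h]
    exact List.mem_map_of_mem hc

-- B's tally after the whole pass: the number of responses containing c
theorem getD_counts (l : List String) (d : PySem.Dict Char Int) (c : Char) :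
    (l.foldl
        (fun counts response =>
          (PySem.Set.ofList response.toList).foldl
            (fun counts ch => counts.insert ch (counts.getD ch 0 + 1)) counts)
        d).getD c 0 =
      d.getD c 0 + (l.countP (fun r => r.toList.contains c) : Int) := by
  induction l generalizing d with
  | nil => simp
  | cons r l ih =>
    simp only [List.foldl_cons, ih, PySem.Dict.getD_foldl_insert_add_one, List.countP_cons]
    have hcnt : (PySem.Set.ofList r.toList).count c =
        if r.toList.contains c then 1 else 0 := by
      by_cases hc : c ∈ r.toList
      · rw [if_pos (by simpa using hc)]
        exact List.count_eq_one_of_mem (PySem.Set.nodup_ofList _) (by simpa [PySem.Set.mem_ofList] using hc)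
      · rw [if_neg (by simpa using hc)]
        exact List.count_eq_zero.mpr (by simpa [PySem.Set.mem_ofList] using hc)
    rw [hcnt]
    split_ifs with hc <;> push_cast <;> ring

-- the count equals the length exactly when every response contains c
theorem countP_eq_length_iff_all (l : List String) (c : Char) :
    ((l.countP (fun r => r.toList.contains c) : Int) == (l.length : Int)) =
      l.all (fun r => r.toList.contains c) := by
  rw [Bool.eq_iff_iff, beq_iff_eq, List.all_eq_true]
  constructor
  · intro h r hr
    have : l.countP (fun r => r.toList.contains c) = l.length := by exact_mod_cast h
    exact List.countP_eq_length.mp this r hr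
  · intro h
    exact_mod_cast List.countP_eq_length.mpr h

-- ===== VERDICT (by name: the statement is the Claim_ definition above) =====
theorem consolidate_questions_spec : Claim_equal_consolidate_questions := by
  intro l _
  unfold Spec_consolidate_questions consolidate_questions consolidate_questions_alt
  simp only
  have hnd : (pvAlpha.map pvKey).Nodup := by decide
  have hkeys := keys_outer l _ keys_init
  rw [PySem.Dict.items_eq_map_keys _ (hkeys ▸ hnd) false, hkeys, List.map_map]
  refine List.map_congr_left (fun a ha => ?_)
  rw [Function.comp_apply, getD_outer, getD_init, getD_counts]
  simp only [ha, if_pos, Bool.true_and, decide_true, Bool.not_true, Bool.false_or,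
    PySem.Dict.getD_empty, zero_add]
  rw [countP_eq_length_iff_all]
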